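-- pv_equiv track=rewrite | github.com/IonelaCristinaNistor/pythonProject | amazon.py | is_valid_regex
-- ===== SOURCE A (Python) =====
-- def is_valid_regex(pattern, x, y, z):
--     """Check if the regex matches x and y but not z."""
--     for char in x:
--         if char not in pattern:
--             return False
--     for char in y:
--         if char not in pattern:
--             return False
--     for char in z:
--         if char in pattern:
--             return False
--     return True
-- ===== SOURCE B (Python) =====
-- def is_valid_regex(pattern, x, y, z):
--     """Check if the regex matches x and y but not z."""
--     needed = set(x) | set(y)
--     banned = set(z)
--     for ch in pattern:
--         if ch in banned:
--             return False
--         needed.discard(ch)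
--     return not needed
-- ===== Notes on version B (the rewrite author's own statement) =====
-- stated objective: alternative
-- what changed: Inverted the traversal: instead of three loops over x, y and z each scanning pattern, B scans pattern ONCE, failing immediately on a char from set(z) and discarding each seen char from the precomputed needed set set(x)|set(y); success is that needed ends empty.
import Mathlib
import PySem

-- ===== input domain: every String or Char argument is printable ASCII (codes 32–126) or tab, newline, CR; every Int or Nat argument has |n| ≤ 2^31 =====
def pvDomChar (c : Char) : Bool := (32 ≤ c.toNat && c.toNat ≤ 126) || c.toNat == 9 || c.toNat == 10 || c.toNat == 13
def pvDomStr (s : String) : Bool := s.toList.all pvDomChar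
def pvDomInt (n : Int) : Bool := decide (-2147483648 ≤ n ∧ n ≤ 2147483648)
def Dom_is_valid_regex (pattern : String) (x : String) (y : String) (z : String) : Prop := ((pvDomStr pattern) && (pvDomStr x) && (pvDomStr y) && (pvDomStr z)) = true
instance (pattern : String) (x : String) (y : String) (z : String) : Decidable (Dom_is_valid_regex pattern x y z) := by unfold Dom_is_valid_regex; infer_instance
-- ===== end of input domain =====

-- B inverts the traversal: one pass over PATTERN with a precomputed needed set (chars of x,y) and banned set (chars of z), instead of A's three loops over x,y,z scanning pattern.

-- ===== PORT A =====
-- loop 'for char in s: if char not in pattern: return False' (early return = stop with false)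
def pvLoopAllIn (pat : List Char) : List Char → Bool
  | [] => true
  | c :: cs => if pat.contains c then pvLoopAllIn pat cs else false

-- loop 'for char in z: if char in pattern: return False'
def pvLoopNoneIn (pat : List Char) : List Char → Bool
  | [] => true
  | c :: cs => if pat.contains c then false else pvLoopNoneIn pat cs

def is_valid_regex (pattern : String) (x : String) (y : String) (z : String) : Bool :=
  if pvLoopAllIn pattern.toList x.toList = false then false
  else if pvLoopAllIn pattern.toList y.toList = false then false
  else if pvLoopNoneIn pattern.toList z.toList = false then false
  else true

-- ===== PORT B =====
-- loop 'for ch in pattern: if ch in banned: return False; needed.discard(ch)', then 'return not needed'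
def pvLoopPat (banned : PySem.Set Char) : List Char → PySem.Set Char → Bool
  | [], needed => needed.isEmpty
  | c :: cs, needed =>
      if PySem.Set.contains banned c then false
      else pvLoopPat banned cs (PySem.Set.discard needed c)

def is_valid_regex_alt (pattern : String) (x : String) (y : String) (z : String) : Bool :=
  let needed : PySem.Set Char := PySem.Set.union (PySem.Set.ofList x.toList) (PySem.Set.ofList y.toList)
  let banned : PySem.Set Char := PySem.Set.ofList z.toList
  pvLoopPat banned pattern.toList needed

-- ===== PRECONDITION & SPEC =====
def Spec_is_valid_regex (pattern : String) (x : String) (y : String) (z : String) (out : Bool) : Prop := out = is_valid_regex_alt pattern x y z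
instance (pattern : String) (x : String) (y : String) (z : String) (out : Bool) : Decidable (Spec_is_valid_regex pattern x y z out) := by unfold Spec_is_valid_regex; infer_instance

-- ===== CLAIM =====
def Claim_equal_is_valid_regex : Prop := ∀ (pattern : String) (x : String) (y : String) (z : String), Dom_is_valid_regex pattern x y z → Spec_is_valid_regex pattern x y z (is_valid_regex pattern x y z)

-- ===== LEMMAS AND PROOFS =====
theorem pvLoopAllIn_eq_true_iff (pat : List Char) (l : List Char) :
    pvLoopAllIn pat l = true ↔ ∀ c ∈ l, c ∈ pat := by
  induction l with
  | nil => simp [pvLoopAllIn]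
  | cons c cs ih =>
    simp only [pvLoopAllIn, List.mem_cons]
    by_cases h : c ∈ pat
    · rw [if_pos (List.contains_iff_mem.mpr h), ih]
      constructor
      · rintro hall d (rfl | hd); exacts [h, hall d hd]
      · intro hall d hd; exact hall d (Or.inr hd)
    · rw [if_neg (fun hc => h (List.contains_iff_mem.mp hc))]
      simp only [Bool.false_eq_true, false_iff, not_forall]
      exact ⟨c, by simp, h⟩

theorem pvLoopNoneIn_eq_true_iff (pat : List Char) (l : List Char) :
    pvLoopNoneIn pat l = true ↔ ∀ c ∈ l, c ∉ pat := by
  induction l with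
  | nil => simp [pvLoopNoneIn]
  | cons c cs ih =>
    simp only [pvLoopNoneIn, List.mem_cons]
    by_cases h : c ∈ pat
    · rw [if_pos (List.contains_iff_mem.mpr h)]
      simp only [Bool.false_eq_true, false_iff, not_forall]
      exact ⟨c, by simp, by simpa using h⟩
    · rw [if_neg (fun hc => h (List.contains_iff_mem.mp hc)), ih]
      constructor
      · rintro hall d (rfl | hd); exacts [h, hall d hd]
      · intro hall d hd; exact hall d (Or.inr hd)

theorem pvLoopPat_eq_true_iff (banned : PySem.Set Char) (l : List Char) (needed : PySem.Set Char) :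
    pvLoopPat banned l needed = true ↔ (∀ c ∈ l, c ∉ banned) ∧ (∀ c ∈ needed, c ∈ l) := by
  induction l generalizing needed with
  | nil =>
    simp [pvLoopPat, List.isEmpty_iff, List.eq_nil_iff_forall_not_mem]
  | cons c cs ih =>
    simp only [pvLoopPat, List.mem_cons]
    by_cases h : c ∈ banned
    · rw [if_pos ((PySem.Set.contains_iff banned c).mpr h)]
      simp only [Bool.false_eq_true, false_iff]
      rintro ⟨hban, -⟩
      exact hban c (Or.inl rfl) h
    · rw [if_neg (fun hc => h ((PySem.Set.contains_iff banned c).mp hc)), ih]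
      constructor
      · rintro ⟨hban, hneed⟩
        refine ⟨?_, ?_⟩
        · rintro d (rfl | hd); exacts [h, hban d hd]
        · intro d hd
          by_cases hdc : d = c
          · exact Or.inl hdc
          · exact Or.inr (hneed d ((PySem.Set.mem_discard needed c d).mpr ⟨hd, hdc⟩))
      · rintro ⟨hban, hneed⟩
        refine ⟨fun d hd => hban d (Or.inr hd), ?_⟩
        intro d hd
        rcases (PySem.Set.mem_discard needed c d).mp hd with ⟨hdn, hdc⟩
        rcases hneed d hdn with rfl | hmem
        · exact absurd rfl hdc
        · exact hmem

-- ===== VERDICT =====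
theorem is_valid_regex_spec : Claim_equal_is_valid_regex := by
  intro pattern x y z _
  unfold Spec_is_valid_regex is_valid_regex is_valid_regex_alt
  rw [Bool.eq_iff_iff]
  rw [pvLoopPat_eq_true_iff]
  simp only [PySem.Set.mem_union, PySem.Set.mem_ofList]
  constructor
  · intro h
    split_ifs at h with h1 h2 h3
    have hx := (pvLoopAllIn_eq_true_iff pattern.toList x.toList).mp (Bool.of_not_eq_false h1)
    have hy := (pvLoopAllIn_eq_true_iff pattern.toList y.toList).mp (Bool.of_not_eq_false h2)
    have hz := (pvLoopNoneIn_eq_true_iff pattern.toList z.toList).mp (Bool.of_not_eq_false h3)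
    refine ⟨fun c hc hcb => hz c hcb hc, fun c hc => ?_⟩
    rcases hc with hcx | hcy
    · exact hx c hcx
    · exact hy c hcy
  · rintro ⟨hban, hneed⟩
    have hx : pvLoopAllIn pattern.toList x.toList = true :=
      (pvLoopAllIn_eq_true_iff _ _).mpr (fun c hc => hneed c (Or.inl hc))
    have hy : pvLoopAllIn pattern.toList y.toList = true :=
      (pvLoopAllIn_eq_true_iff _ _).mpr (fun c hc => hneed c (Or.inr hc))
    have hz : pvLoopNoneIn pattern.toList z.toList = true :=
      (pvLoopNoneIn_eq_true_iff _ _).mpr (fun c hcz hcp =>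
        hban c hcp hcz)
    simp [hx, hy, hz]
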